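-- pv_equiv track=rewrite | github.com/leonardoVsantoro/AOC | 2024/day25.py | get_enc
-- ===== SOURCE A (Python) =====
-- def get_enc(data):
--     heights = []
--     for j in range(len(data[0])):
--         for i in range(len(data)):
--             if data[i][j] != '#':
--                 heights.append(i-1)
--                 break
--     return heights
-- ===== SOURCE B (Python) =====
-- def get_enc(data):
--     w = len(data[0])
--     heights = [None] * w
--     for i, row in enumerate(data):
--         for j in range(w):
--             if heights[j] is None and row[j] != '#':
--                 heights[j] = i - 1
--     return [h for h in heights if h is not None]
-- ===== Notes on version B (the rewrite author's own statement) =====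
-- stated objective: alternative
-- what changed: Replaces A's column-major scan with early break by a single row-major sweep that records, per column, the first row holding a non-'#' character, then filters out the never-finished (all-'#') columns.
-- outside the precondition, e.g. on get_enc([]): A raises IndexError, B raises IndexError; on get_enc(['##', '.']): A raises IndexError, B raises IndexError
import Mathlib
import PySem

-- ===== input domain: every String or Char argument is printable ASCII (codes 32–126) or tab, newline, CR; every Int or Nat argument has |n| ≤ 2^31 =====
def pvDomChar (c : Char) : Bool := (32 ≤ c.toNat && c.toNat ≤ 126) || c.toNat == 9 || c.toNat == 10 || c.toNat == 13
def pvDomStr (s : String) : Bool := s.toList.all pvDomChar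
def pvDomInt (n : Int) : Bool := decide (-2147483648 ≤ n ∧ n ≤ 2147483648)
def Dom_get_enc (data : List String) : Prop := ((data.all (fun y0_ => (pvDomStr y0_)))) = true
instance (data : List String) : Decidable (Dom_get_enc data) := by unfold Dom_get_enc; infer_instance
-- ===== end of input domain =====

-- B changes the traversal: one row-major sweep recording per-column first non-'#' row, instead of A's
-- column-major scans with early break (objective: alternative decomposition, same cost).

-- ===== PORT A =====
-- inner loop 'for i in range(len(data))' of A, scanning column j; none = loop ended without append
-- (also returned where data[i][j] would raise IndexError — those inputs are outside Pre_)
def get_enc_scanCol (rows : List String) (j : Int) (i : Int) : Option Int :=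
  match rows with
  | [] => none
  | r :: rest =>
    match PySem.Str.pyGet? r j with
    | some c => if c ≠ '#' then some (i - 1) else get_enc_scanCol rest j (i + 1)
    | none => none

def get_enc (data : List String) : List Int :=
  match data with
  | [] => []  -- data[0] raises IndexError in Python (outside Pre_)
  | r0 :: _ =>
    (PySem.List.pyRange 0 (PySem.Str.len r0) 1).foldl
      (fun acc j =>
        match get_enc_scanCol data j 0 with
        | some h => acc ++ [h]
        | none => acc) []

-- ===== PORT B =====
-- inner loop 'for j in range(w)' of B over one row; walks heights and the row's chars in lockstep
-- (when the row is shorter than heights and heights[j] is None, Python raises — outside Pre_; port keeps None)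
def get_enc_sweepRow (chars : List Char) (i : Int) (heights : List (Option Int)) : List (Option Int) :=
  match heights, chars with
  | [], _ => []
  | h :: hs, [] => h :: get_enc_sweepRow [] i hs
  | h :: hs, c :: cs => (if h = none ∧ c ≠ '#' then some (i - 1) else h) :: get_enc_sweepRow cs i hs

def get_enc_alt (data : List String) : List Int :=
  match data with
  | [] => []  -- len(data[0]) raises IndexError in Python (outside Pre_)
  | r0 :: _ =>
    let init : List (Option Int) := List.replicate r0.toList.length none
    let final := (PySem.List.enumerate data 0).foldl
      (fun hs (p : Int × String) => get_enc_sweepRow p.2.toList p.1 hs) init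
    final.filterMap id

-- ===== PRECONDITION & SPEC =====
def pvRow (rs : List String) (k : Nat) : List Char := (rs.getD k "").toList

-- Pre_ excludes exactly the inputs where Python A raises IndexError: the empty list (data[0]),
-- and inputs where, in some column j < len(data[0]), a row shorter than j+1 is reached before the
-- first non-'#' character (data[i][j]); A returns on everything else and Pre_ admits all of it.
def Pre_get_enc (data : List String) : Prop :=
  data ≠ [] ∧
  ∀ j : Nat, j < (pvRow data 0).length →
    ∀ i : Nat, i < data.length →
      (pvRow data i).length ≤ j →
        ∃ i' : Nat, i' < i ∧ j < (pvRow data i').length ∧ (pvRow data i')[j]? ≠ some '#'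
instance (data : List String) : Decidable (Pre_get_enc data) := by unfold Pre_get_enc; infer_instance

def pvWitness_get_enc : List String := ["#.", "##", ".#"]

def Spec_get_enc (data : List String) (out : List Int) : Prop := out = get_enc_alt data
instance (data : List String) (out : List Int) : Decidable (Spec_get_enc data out) := by unfold Spec_get_enc; infer_instance

-- ===== CLAIM (what is proved, stated in full; the proofs are below) =====
def Claim_equal_get_enc : Prop := ∀ (data : List String), Dom_get_enc data → Pre_get_enc data → Spec_get_enc data (get_enc data)

-- ===== LEMMAS AND PROOFS =====

theorem sweep_len (chars : List Char) (i : Int) (hs : List (Option Int)) :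
    (get_enc_sweepRow chars i hs).length = hs.length := by
  induction hs generalizing chars with
  | nil => cases chars <;> simp [get_enc_sweepRow]
  | cons h hs ih => cases chars <;> simp [get_enc_sweepRow, ih]

theorem sweep_get? (chars : List Char) (i : Int) (hs : List (Option Int)) (j : Nat) :
    (get_enc_sweepRow chars i hs)[j]? =
      (hs[j]?).map (fun h =>
        match h, chars[j]? with
        | some v, _ => some v
        | none, some c => if c ≠ '#' then some (i - 1) else none
        | none, none => none) := by
  induction hs generalizing chars j with
  | nil => cases chars <;> simp [get_enc_sweepRow]
  | cons h hs ih =>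
    cases chars with
    | nil =>
      cases j with
      | zero => cases h <;> simp [get_enc_sweepRow]
      | succ j => simpa [get_enc_sweepRow] using ih [] j
    | cons c cs =>
      cases j with
      | zero => cases h <;> simp [get_enc_sweepRow]
      | succ j => simpa [get_enc_sweepRow] using ih cs j

theorem fold_len (rs : List String) (s : Int) (hs : List (Option Int)) :
    ((PySem.List.enumerate rs s).foldl
      (fun hs (p : Int × String) => get_enc_sweepRow p.2.toList p.1 hs) hs).length = hs.length := by
  induction rs generalizing s hs with
  | nil => simp [PySem.List.enumerate_nil]
  | cons r rest ih => simp [PySem.List.enumerate_cons, ih, sweep_len]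

theorem fold_some (rs : List String) (s : Int) (hs : List (Option Int)) (j : Nat) (v : Int)
    (h : hs[j]? = some (some v)) :
    ((PySem.List.enumerate rs s).foldl
      (fun hs (p : Int × String) => get_enc_sweepRow p.2.toList p.1 hs) hs)[j]? = some (some v) := by
  induction rs generalizing s hs with
  | nil => simpa [PySem.List.enumerate_nil]
  | cons r rest ih =>
    rw [PySem.List.enumerate_cons, List.foldl_cons]
    exact ih (s + 1) _ (by simp [sweep_get?, h])

theorem fold_none (rs : List String) (s : Int) (hs : List (Option Int)) (j : Nat)
    (h : hs[j]? = some none)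
    (hsafe : ∀ i : Nat, i < rs.length → (pvRow rs i).length ≤ j →
      ∃ i' : Nat, i' < i ∧ j < (pvRow rs i').length ∧ (pvRow rs i')[j]? ≠ some '#') :
    ((PySem.List.enumerate rs s).foldl
      (fun hs (p : Int × String) => get_enc_sweepRow p.2.toList p.1 hs) hs)[j]? =
      some (get_enc_scanCol rs (j : Int) s) := by
  induction rs generalizing s hs with
  | nil => simpa [PySem.List.enumerate_nil, get_enc_scanCol]
  | cons r rest ih =>
    rw [PySem.List.enumerate_cons, List.foldl_cons]
    have hjr : j < r.toList.length := by
      by_contra hlt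
      obtain ⟨i', hi0, _⟩ := hsafe 0 (by simp) (by simpa [pvRow] using Nat.le_of_not_lt hlt)
      omega
    have hc : r.toList[j]? = some r.toList[j] := List.getElem?_eq_getElem hjr
    by_cases hne : r.toList[j] ≠ '#'
    · have := fold_some rest (s + 1) (get_enc_sweepRow r.toList s hs) j (s - 1)
        (by simp [sweep_get?, h, hc, hne])
      rw [this, get_enc_scanCol]
      simp [hc, hne]
    · rw [not_not] at hne
      have hstep : (get_enc_sweepRow r.toList s hs)[j]? = some none := by
        simp [sweep_get?, h, hc, hne]
      have hsafe' : ∀ i : Nat, i < rest.length → (pvRow rest i).length ≤ j →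
          ∃ i' : Nat, i' < i ∧ j < (pvRow rest i').length ∧ (pvRow rest i')[j]? ≠ some '#' := by
        intro i hi hshort
        obtain ⟨i', hi', hlong, hch⟩ := hsafe (i + 1) (by simpa using Nat.succ_lt_succ hi)
          (by simpa [pvRow] using hshort)
        cases i' with
        | zero => exact absurd (by simp [pvRow, hc, hne]) hch
        | succ i'' =>
          exact ⟨i'', by omega, by simpa [pvRow] using hlong, by simpa [pvRow] using hch⟩
      rw [ih (s + 1) _ hstep hsafe', get_enc_scanCol]
      simp [hc, hne]

theorem foldl_range_option (g : Nat → Option Int) (n : Nat) (init : List Int) :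
    (List.range n).foldl
      (fun acc k => match g k with | some h => acc ++ [h] | none => acc) init =
      init ++ (List.range n).filterMap g := by
  induction n generalizing init with
  | zero => simp
  | succ n ih =>
    rw [List.range_succ, List.foldl_append, ih, List.filterMap_append]
    cases hg : g n <;> simp [hg]

-- ===== VERDICT (by name: the statement is the Claim_ definition above) =====
theorem get_enc_spec : Claim_equal_get_enc := by
  intro data _ hpre
  obtain ⟨hne, hsafe⟩ := hpre
  unfold Spec_get_enc
  cases data with
  | nil => exact absurd rfl hne
  | cons r0 tl =>
    set data := r0 :: tl with hdata
    set w := r0.toList.length with hw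
    set g : Nat → Option Int := fun k => get_enc_scanCol data (k : Int) 0 with hg
    -- the B-side fold result, pointwise
    set final := (PySem.List.enumerate data 0).foldl
      (fun hs (p : Int × String) => get_enc_sweepRow p.2.toList p.1 hs)
      (List.replicate w none) with hfinal
    have hflen : final.length = w := by
      rw [hfinal, fold_len]; simp
    have hfget : ∀ j : Nat, j < w → final[j]? = some (g j) := by
      intro j hj
      rw [hfinal]
      exact fold_none data 0 (List.replicate w none) j
        (by simp [hj])
        (fun i hi hshort => hsafe j (by simpa [pvRow] using hj) i hi hshort)
    have hfeq : final = (List.range w).map g := by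
      apply List.ext_getElem?
      intro j
      by_cases hj : j < w
      · rw [hfget j hj]
        simp [List.getElem?_map, List.getElem?_range hj]
      · rw [List.getElem?_eq_none (by omega), List.getElem?_eq_none (by simpa using by omega)]
    -- A side
    have hA : get_enc data = (List.range w).filterMap g := by
      rw [hdata]
      show (PySem.List.pyRange 0 (PySem.Str.len r0) 1).foldl _ [] = _
      have hr : PySem.List.pyRange 0 (PySem.Str.len r0) 1 =
          (List.range w).map (fun k => ((k : Nat) : Int)) := by
        rw [PySem.Str.len_eq, PySem.List.pyRange_one,
          show (((r0.toList.length : Int)) - 0).toNat = w from by rw [hw]; omega]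
        simp only [zero_add]
      rw [hr, List.foldl_map]
      simpa using foldl_range_option g w []
    -- B side
    have hB : get_enc_alt data = (List.range w).filterMap g := by
      rw [hdata]
      show final.filterMap id = _
      rw [hfeq, List.filterMap_map]
      simp
    rw [hA, hB]
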